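-- pv_equiv track=rewrite | github.com/HirenRupchandani/leetcode-submissions | 1381-maximum-score-words-formed-by-letters/1381-maximum-score-words-formed-by-letters.py | score_calculator
-- ===== SOURCE A (Python) =====
-- def score_calculator(word,count,scores):
--     char_count = [0] * 26
--     score = 0
--
--     # Calculate word score if letters are in word
--     for char in word:
--         pos = ord(char) - 97 # ord('a')
--         char_count[pos] += 1
--         if char_count[pos] <= count[pos]:
--             score+=scores[pos]
--         else:
--             return 0 # Word not found
--     return score
-- ===== SOURCE B (Python) =====
-- def score_calculator(word, count, scores):
--     # Count-then-check-then-sum decomposition (no fused early-return loop).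
--     freq = [0] * 26
--     for ch in word:
--         freq[ord(ch) - 97] += 1
--     if any(f > 0 and f > c for f, c in zip(freq, count)):
--         return 0  # some letter of word is not available often enough
--     return sum(scores[ord(ch) - 97] for ch in word)
-- ===== Notes on version B (the rewrite author's own statement) =====
-- stated objective: simpler
-- what changed: A's fused single pass that updates running counts and early-returns on the first shortage is replaced by three separate simple passes: build the full 26-letter frequency table, then check availability with one any() over zip(freq, count), then sum the scores.
-- outside the precondition, e.g. on score_calculator('a!', [0], []): A returns 0, B raises IndexError; on score_calculator('ab', [1, 0], [7]): A returns 0, B returns 0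
import Mathlib
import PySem

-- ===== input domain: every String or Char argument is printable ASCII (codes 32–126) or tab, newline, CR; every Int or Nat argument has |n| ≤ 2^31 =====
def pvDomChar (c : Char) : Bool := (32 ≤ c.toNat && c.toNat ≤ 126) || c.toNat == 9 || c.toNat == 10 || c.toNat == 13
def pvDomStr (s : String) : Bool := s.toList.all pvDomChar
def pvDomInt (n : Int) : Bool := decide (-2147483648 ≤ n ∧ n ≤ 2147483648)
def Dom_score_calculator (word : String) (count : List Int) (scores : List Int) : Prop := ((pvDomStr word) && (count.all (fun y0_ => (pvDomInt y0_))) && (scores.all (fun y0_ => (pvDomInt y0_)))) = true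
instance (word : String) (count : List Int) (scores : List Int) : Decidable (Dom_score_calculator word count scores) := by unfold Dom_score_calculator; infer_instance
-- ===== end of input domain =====

-- B replaces A's fused count-check-accumulate loop with early return by three separate
-- passes (count all letters, then one availability check, then one score sum): simpler decomposition.


-- Python's `l[i] = v` for an in-range possibly negative index i (exact for -len ≤ i < len,
-- the only indices Pre_ admits; Python raises IndexError outside that range)
def pySetIdx (l : List Int) (i : Int) (v : Int) : List Int :=
  if i < 0 then l.set (l.length - (-i).toNat) v else l.set i.toNat v

-- ===== PORT A =====
-- A's loop: running char_count (26 zeros), add score per char, early return 0 on shortage.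
-- Under Pre_ every index ord(c)-97 is in range (-26 ≤ idx < 26 against a 26-long list, or
-- 0 ≤ idx < 26 against a ≥26-long list), so `pyGet? … |>.getD 0` and `pySetIdx` are exact.
def scLoopA (count scores : List Int) : List Char → List Int → Int → Int
  | [], _, score => score
  | c :: rest, char_count, score =>
    let pos : Int := (c.toNat : Int) - 97
    let char_count' : List Int :=
      pySetIdx char_count pos ((PySem.List.pyGet? char_count pos).getD 0 + 1)
    if (PySem.List.pyGet? char_count' pos).getD 0 ≤ (PySem.List.pyGet? count pos).getD 0 then
      scLoopA count scores rest char_count' (score + (PySem.List.pyGet? scores pos).getD 0)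
    else 0

def score_calculator (word : String) (count : List Int) (scores : List Int) : Int :=
  scLoopA count scores word.toList (List.replicate 26 0) 0

-- ===== PORT B =====
-- Pass 1 of B: the full frequency table of `word`.
def freqLoopB : List Char → List Int → List Int
  | [], f => f
  | c :: rest, f =>
    let pos : Int := (c.toNat : Int) - 97
    freqLoopB rest (pySetIdx f pos ((PySem.List.pyGet? f pos).getD 0 + 1))

def score_calculator_alt (word : String) (count : List Int) (scores : List Int) : Int :=
  let freq := freqLoopB word.toList (List.replicate 26 0)
  if (freq.zip count).any (fun fc => decide (0 < fc.1) && decide (fc.2 < fc.1)) then 0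
  else word.toList.foldl (fun s c => s + (PySem.List.pyGet? scores ((c.toNat : Int) - 97)).getD 0) 0

-- ===== PRECONDITION & SPEC =====
-- Pre_ excludes the inputs where A raises IndexError (a character before 'G' or after 'z',
-- or a list too short for an index the loop reaches), and the inputs where the value A still
-- manages to return before hitting such an index is an accident of its early exit or of
-- Python's negative-index wraparound meeting lists whose length is not 26.  It keeps: the
-- empty word; words of 'a'..'z' whose letters index into count (and into scores too, unless
-- the very first letter already busts its budget, so that scores is never read); and words
-- of 'G'..'z' (codes 71-122, ord(c)-97 wrapping consistently) with both lists of length 26.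
def Pre_score_calculator (word : String) (count : List Int) (scores : List Int) : Prop :=
  word.toList = [] ∨
  (word.toList.all (fun c =>
      97 ≤ c.toNat && c.toNat ≤ 122 && c.toNat - 97 < count.length) = true ∧
    (word.toList.all (fun c => c.toNat - 97 < scores.length) = true ∨
     word.toList.head?.any (fun c0 => decide (count.getD (c0.toNat - 97) 0 < 1)) = true)) ∨
  (word.toList.all (fun c => 71 ≤ c.toNat && c.toNat ≤ 122) = true ∧
    count.length = 26 ∧ scores.length = 26)
instance (word : String) (count : List Int) (scores : List Int) : Decidable (Pre_score_calculator word count scores) := by unfold Pre_score_calculator; infer_instance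

def pvWitness_score_calculator : String × List Int × List Int :=
  ("ab", [1, 1, 1, 1, 1, 1, 1, 1, 1, 1, 1, 1, 1, 1, 1, 1, 1, 1, 1, 1, 1, 1, 1, 1, 1, 1],
   [2, 2, 2, 2, 2, 2, 2, 2, 2, 2, 2, 2, 2, 2, 2, 2, 2, 2, 2, 2, 2, 2, 2, 2, 2, 2])

def Spec_score_calculator (word : String) (count : List Int) (scores : List Int) (out : Int) : Prop := out = score_calculator_alt word count scores
instance (word : String) (count : List Int) (scores : List Int) (out : Int) : Decidable (Spec_score_calculator word count scores out) := by unfold Spec_score_calculator; infer_instance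

-- ===== CLAIM (what is proved, stated in full; the proofs are below) =====
def Claim_equal_score_calculator : Prop := ∀ (word : String) (count : List Int) (scores : List Int), Dom_score_calculator word count scores → Pre_score_calculator word count scores → Spec_score_calculator word count scores (score_calculator word count scores)

-- ===== LEMMAS AND PROOFS =====

-- the slot of the 26-long table that Python's l[ord(c)-97] actually touches (codes 71–122)
def eff (c : Char) : Nat := if 97 ≤ c.toNat then c.toNat - 97 else c.toNat - 71

-- the per-character side conditions the equivalence needs
def Good (count scores : List Int) (c : Char) : Prop :=
  71 ≤ c.toNat ∧ c.toNat ≤ 122 ∧ (97 ≤ c.toNat ∨ (count.length = 26 ∧ scores.length = 26))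

-- number of characters of w that hit letter slot i
def occ (w : List Char) (i : Nat) : Nat := w.countP (fun c => eff c == i)

-- `A does not early-return`: every letter used in w stays within its budget
def okA (count cc : List Int) (w : List Char) : Prop :=
  ∀ i < 26, 0 < occ w i → cc.getD i 0 + (occ w i : Int) ≤ count.getD i 0

-- the per-character score sum (B's final pass, recursively)
def wsum (scores : List Int) : List Char → Int
  | [] => 0
  | c :: r => (PySem.List.pyGet? scores ((c.toNat : Int) - 97)).getD 0 + wsum scores r

theorem eff_lt {c : Char} (h71 : 71 ≤ c.toNat) (h122 : c.toNat ≤ 122) : eff c < 26 := by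
  unfold eff; split <;> omega

theorem occ_nil (i : Nat) : occ [] i = 0 := rfl

theorem occ_cons (c : Char) (rest : List Char) (i : Nat) :
    occ (c :: rest) i = occ rest i + (if eff c = i then 1 else 0) := by
  simp [occ, List.countP_cons]

theorem occ_cons_self {c : Char} {rest : List Char} {p : Nat} (hp : eff c = p) :
    occ (c :: rest) p = occ rest p + 1 := by rw [occ_cons, if_pos hp]

theorem occ_cons_ne {c : Char} {rest : List Char} {p : Nat} (hp : eff c ≠ p) :
    occ (c :: rest) p = occ rest p := by rw [occ_cons, if_neg hp, Nat.add_zero]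

theorem getD_set_self (l : List Int) (p : Nat) (v : Int) (h : p < l.length) :
    (l.set p v).getD p 0 = v := by
  simp [List.getD_eq_getElem?_getD, h]

theorem getD_set_ne (l : List Int) (i p : Nat) (v : Int) (h : i ≠ p) :
    (l.set p v).getD i 0 = l.getD i 0 := by
  simp [List.getD_eq_getElem?_getD, Ne.symm h]

theorem getD_replicate (i : Nat) : (List.replicate 26 (0 : Int)).getD i 0 = 0 := by
  rcases lt_or_ge i 26 with h | h
  · rw [List.getD_eq_getElem _ _ (by simpa using h), List.getElem_replicate]
  · rw [List.getD_eq_default _ _ (by simpa using h)]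

-- Python's read l[ord(c)-97] lands on slot `eff c`
theorem get_eff (l : List Int) (c : Char) (h71 : 71 ≤ c.toNat) (h122 : c.toNat ≤ 122)
    (hl : 97 ≤ c.toNat ∨ l.length = 26) :
    (PySem.List.pyGet? l ((c.toNat : Int) - 97)).getD 0 = l.getD (eff c) 0 := by
  by_cases h97 : 97 ≤ c.toNat
  · have hcast : (c.toNat : Int) - 97 = ((c.toNat - 97 : Nat) : Int) := by omega
    rw [hcast, PySem.List.pyGet?_natCast, ← List.getD_eq_getElem?_getD, eff, if_pos h97]
  · have hlen : l.length = 26 := hl.resolve_left h97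
    have hcast : (c.toNat : Int) - 97 = -((97 - c.toNat : Nat) : Int) := by omega
    rw [hcast, PySem.List.pyGet?_neg_natCast (xs := l) (k := 97 - c.toNat) (by omega) (by omega),
        ← List.getD_eq_getElem?_getD, eff, if_neg h97, hlen]
    congr 1
    omega

-- Python's write l[ord(c)-97] = v lands on slot `eff c`
theorem set_eff (l : List Int) (c : Char) (v : Int) (h71 : 71 ≤ c.toNat)
    (h122 : c.toNat ≤ 122) (hl : l.length = 26) :
    pySetIdx l ((c.toNat : Int) - 97) v = l.set (eff c) v := by
  unfold pySetIdx eff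
  by_cases h97 : 97 ≤ c.toNat
  · rw [if_neg (by omega), if_pos h97]
    congr 1
    omega
  · rw [if_pos (by omega), if_neg h97, hl]
    congr 1
    omega

theorem pySetIdx_length (l : List Int) (i : Int) (v : Int) :
    (pySetIdx l i v).length = l.length := by
  unfold pySetIdx; split <;> simp

theorem ok_cons {count cc : List Int} {c : Char} {rest : List Char} {p : Nat}
    (hp : eff c = p) (hpos : p < 26) (hcc : cc.length = 26) :
    okA count cc (c :: rest) ↔
      (cc.getD p 0 + 1 ≤ count.getD p 0 ∧
       okA count (cc.set p (cc.getD p 0 + 1)) rest) := by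
  constructor
  · intro h
    have h1 := h p hpos (by rw [occ_cons_self hp]; omega)
    rw [occ_cons_self hp] at h1
    push_cast at h1
    refine ⟨by omega, ?_⟩
    intro i hi hoi
    by_cases hip : i = p
    · subst hip
      rw [getD_set_self _ _ _ (by omega)]
      omega
    · have hne : eff c ≠ i := by omega
      rw [getD_set_ne _ _ _ _ hip]
      have h2 := h i hi (by rwa [occ_cons_ne hne])
      rwa [occ_cons_ne hne] at h2
  · rintro ⟨h1, h2⟩ i hi hoi
    by_cases hip : i = p
    · subst hip
      rw [occ_cons_self hp]
      by_cases hr : 0 < occ rest i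
      · have h3 := h2 i hi hr
        rw [getD_set_self _ _ _ (by omega)] at h3
        push_cast at h3 ⊢
        omega
      · have hz : occ rest i = 0 := by omega
        rw [hz]
        push_cast
        omega
    · have hne : eff c ≠ i := by omega
      rw [occ_cons_ne hne]
      have h3 := h2 i hi (by rwa [occ_cons_ne hne] at hoi)
      rwa [getD_set_ne _ _ _ _ hip] at h3

-- one step of A's loop, with the indexing already normalised to slot `eff c`
theorem scLoopA_cons_eq (count scores cc : List Int) (c : Char) (rest : List Char)
    (score : Int) (hg : Good count scores c) (hcc : cc.length = 26) :
    scLoopA count scores (c :: rest) cc score =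
      if cc.getD (eff c) 0 + 1 ≤ count.getD (eff c) 0 then
        scLoopA count scores rest (cc.set (eff c) (cc.getD (eff c) 0 + 1))
          (score + scores.getD (eff c) 0)
      else 0 := by
  obtain ⟨h71, h122, hor⟩ := hg
  have hcs : 97 ≤ c.toNat ∨ count.length = 26 := by tauto
  have hss : 97 ≤ c.toNat ∨ scores.length = 26 := by tauto
  rw [scLoopA]
  simp only [get_eff cc c h71 h122 (Or.inr hcc), set_eff cc c _ h71 h122 hcc,
    get_eff (cc.set (eff c) (cc.getD (eff c) 0 + 1)) c h71 h122 (Or.inr (by simp [hcc])),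
    get_eff count c h71 h122 hcs, get_eff scores c h71 h122 hss]
  rw [getD_set_self cc (eff c) _ (by have := eff_lt h71 h122; omega)]

theorem scLoopA_of_ok (count scores : List Int) (w : List Char) :
    ∀ (cc : List Int) (score : Int),
    (∀ c ∈ w, Good count scores c) → cc.length = 26 → okA count cc w →
    scLoopA count scores w cc score = score + wsum scores w := by
  induction w with
  | nil => intro cc score _ _ _; simp [scLoopA, wsum]
  | cons c rest ih =>
    intro cc score hg hcc hok
    have hgc := hg c (by simp)
    have hpos : eff c < 26 := eff_lt hgc.1 hgc.2.1
    obtain ⟨hcond, hok'⟩ := (ok_cons rfl hpos hcc).mp hok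
    rw [scLoopA_cons_eq count scores cc c rest score hgc hcc, if_pos hcond,
        ih _ _ (fun x hx => hg x (by simp [hx])) (by simp [hcc]) hok', wsum,
        get_eff scores c hgc.1 hgc.2.1 (by rcases hgc.2.2 with h | h; exact Or.inl h; exact Or.inr h.2)]
    ring

theorem scLoopA_of_not_ok (count scores : List Int) (w : List Char) :
    ∀ (cc : List Int) (score : Int),
    (∀ c ∈ w, Good count scores c) → cc.length = 26 → ¬ okA count cc w →
    scLoopA count scores w cc score = 0 := by
  induction w with
  | nil =>
    intro cc score _ _ hok
    exact absurd (fun i _ h => by simp [occ_nil] at h) hok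
  | cons c rest ih =>
    intro cc score hg hcc hok
    have hgc := hg c (by simp)
    have hpos : eff c < 26 := eff_lt hgc.1 hgc.2.1
    rw [scLoopA_cons_eq count scores cc c rest score hgc hcc]
    by_cases hcond : cc.getD (eff c) 0 + 1 ≤ count.getD (eff c) 0
    · rw [if_pos hcond]
      refine ih _ _ (fun x hx => hg x (by simp [hx])) (by simp [hcc]) ?_
      intro hok'
      exact hok ((ok_cons rfl hpos hcc).mpr ⟨hcond, hok'⟩)
    · rw [if_neg hcond]

theorem freqLoopB_length (w : List Char) : ∀ f : List Int, (freqLoopB w f).length = f.length := by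
  induction w with
  | nil => intro f; rfl
  | cons c rest ih => intro f; rw [freqLoopB]; simp [ih, pySetIdx_length]

theorem freqLoopB_getD (w : List Char) :
    ∀ (f : List Int) (i : Nat), i < 26 → f.length = 26 →
    (∀ c ∈ w, 71 ≤ c.toNat ∧ c.toNat ≤ 122) →
    (freqLoopB w f).getD i 0 = f.getD i 0 + (occ w i : Int) := by
  induction w with
  | nil => intro f i _ _ _; simp [freqLoopB, occ_nil]
  | cons c rest ih =>
    intro f i hi hf hlow
    have hc := hlow c (by simp)
    have hpos : eff c < 26 := eff_lt hc.1 hc.2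
    rw [freqLoopB]
    simp only [get_eff f c hc.1 hc.2 (Or.inr hf), set_eff f c _ hc.1 hc.2 hf]
    rw [ih _ i hi (by simp [hf]) (fun x hx => hlow x (by simp [hx]))]
    by_cases hip : i = eff c
    · subst hip
      rw [getD_set_self _ _ _ (by omega), occ_cons_self rfl]
      push_cast
      ring
    · rw [getD_set_ne _ _ _ _ hip, occ_cons_ne (by omega)]

theorem sum_foldl (scores : List Int) (w : List Char) :
    ∀ s : Int, w.foldl (fun s c => s + (PySem.List.pyGet? scores ((c.toNat : Int) - 97)).getD 0) s
      = s + wsum scores w := by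
  induction w with
  | nil => intro s; simp [wsum]
  | cons c rest ih => intro s; rw [List.foldl_cons, ih, wsum]; ring

-- the zip-any check over a 26-long freq list, as an existential over slots
theorem any_zip_iff {freq count : List Int} (hf : freq.length = 26)
    (hc : ∀ i < 26, 0 < freq.getD i 0 → i < count.length) :
    (freq.zip count).any (fun fc => decide (0 < fc.1) && decide (fc.2 < fc.1)) = true ↔
      ∃ i < 26, 0 < freq.getD i 0 ∧ count.getD i 0 < freq.getD i 0 := by
  rw [List.any_eq_true]
  constructor
  · rintro ⟨x, hx, hpx⟩
    obtain ⟨i, hilt, hxi⟩ := List.mem_iff_getElem.mp hx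
    have hiz : i < 26 := by
      have h26 := hilt; rw [List.length_zip, hf] at h26; omega
    refine ⟨i, hiz, ?_⟩
    rw [List.getElem_zip] at hxi
    simp only [← hxi, Bool.and_eq_true, decide_eq_true_eq] at hpx
    have hcl : i < count.length := by
      rw [List.length_zip] at hilt; omega
    rw [List.getD_eq_getElem _ _ (by omega), List.getD_eq_getElem _ _ (by omega)]
    exact hpx
  · rintro ⟨i, hi, h1, h2⟩
    have hcl : i < count.length := hc i hi h1
    have hilt : i < (freq.zip count).length := by rw [List.length_zip]; omega
    refine ⟨(freq.zip count)[i], List.getElem_mem hilt, ?_⟩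
    rw [List.getElem_zip]
    rw [List.getD_eq_getElem _ _ (by omega)] at h1 h2
    rw [List.getD_eq_getElem _ _ (by omega)] at h2
    simp [h1, h2]

-- the shared core: for a word of well-indexed characters with usable tables, A = B
theorem core_eq (word : String) (count scores : List Int)
    (hg : ∀ c ∈ word.toList, Good count scores c)
    (husable : ∀ i < 26, 0 < occ word.toList i → i < count.length) :
    score_calculator word count scores = score_calculator_alt word count scores := by
  classical
  unfold score_calculator score_calculator_alt
  have hlow : ∀ c ∈ word.toList, 71 ≤ c.toNat ∧ c.toNat ≤ 122 :=
    fun c hc => ⟨(hg c hc).1, (hg c hc).2.1⟩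
  have hzlen : (List.replicate 26 (0 : Int)).length = 26 := by simp
  have hflen : (freqLoopB word.toList (List.replicate 26 0)).length = 26 := by
    rw [freqLoopB_length]; simp
  have hfreq : ∀ i < 26, (freqLoopB word.toList (List.replicate 26 0)).getD i 0
      = (occ word.toList i : Int) := by
    intro i hi
    rw [freqLoopB_getD word.toList (List.replicate 26 0) i hi hzlen hlow, getD_replicate,
        zero_add]
  have hfc : ∀ i < 26, 0 < (freqLoopB word.toList (List.replicate 26 0)).getD i 0 →
      i < count.length := by
    intro i hi h
    rw [hfreq i hi] at h
    exact husable i hi (by exact_mod_cast h)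
  change scLoopA count scores word.toList (List.replicate 26 0) 0 =
    if ((freqLoopB word.toList (List.replicate 26 0)).zip count).any
        (fun fc => decide (0 < fc.1) && decide (fc.2 < fc.1)) = true then 0
    else List.foldl (fun s c => s + (PySem.List.pyGet? scores ((c.toNat : Int) - 97)).getD 0) 0
      word.toList
  by_cases hok : okA count (List.replicate 26 0) word.toList
  · rw [scLoopA_of_ok count scores word.toList (List.replicate 26 0) 0 hg hzlen hok]
    have hany : ((freqLoopB word.toList (List.replicate 26 0)).zip count).any
        (fun fc => decide (0 < fc.1) && decide (fc.2 < fc.1)) = false := by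
      rw [Bool.eq_false_iff]
      intro h
      obtain ⟨i, hi, h1, h2⟩ := (any_zip_iff hflen hfc).mp h
      rw [hfreq i hi] at h1 h2
      have h3 := hok i hi (by exact_mod_cast h1)
      rw [getD_replicate] at h3
      omega
    rw [hany]
    simp only [Bool.false_eq_true, if_false]
    rw [sum_foldl]
  · rw [scLoopA_of_not_ok count scores word.toList (List.replicate 26 0) 0 hg hzlen hok]
    have hex : ∃ i < 26, 0 < occ word.toList i ∧
        (occ word.toList i : Int) > count.getD i 0 := by
      by_contra hcon
      push Not at hcon
      refine hok fun i hi hoi => ?_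
      rw [getD_replicate, zero_add]
      exact hcon i hi hoi
    obtain ⟨i, hi, h1, h2⟩ := hex
    have hany : ((freqLoopB word.toList (List.replicate 26 0)).zip count).any
        (fun fc => decide (0 < fc.1) && decide (fc.2 < fc.1)) = true := by
      rw [any_zip_iff hflen hfc]
      exact ⟨i, hi, by rw [hfreq i hi]; exact_mod_cast h1, by rw [hfreq i hi]; omega⟩
    rw [hany]
    simp

-- ===== VERDICT (by name: the statement is the Claim_ definition above) =====
theorem score_calculator_spec : Claim_equal_score_calculator := by
  intro word count scores _ hpre
  unfold Spec_score_calculator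
  rcases hpre with hnil | ⟨hlowb, _⟩ | ⟨hmidb, hcount, hscores⟩
  · -- empty word: A returns the initial score 0; B's freq is all zeros, check fails, sum is 0
    unfold score_calculator score_calculator_alt
    rw [hnil]
    have hanyf : ((List.replicate 26 (0 : Int)).zip count).any
        (fun fc => decide (0 < fc.1) && decide (fc.2 < fc.1)) = false := by
      rw [Bool.eq_false_iff]
      intro h
      rw [List.any_eq_true] at h
      obtain ⟨x, hx, hpx⟩ := h
      have hx0 : x.1 = 0 := List.eq_of_mem_replicate (List.of_mem_zip hx).1
      simp [hx0] at hpx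
    change scLoopA count scores [] (List.replicate 26 0) 0 =
      if ((freqLoopB [] (List.replicate 26 0)).zip count).any
          (fun fc => decide (0 < fc.1) && decide (fc.2 < fc.1)) = true then 0
      else List.foldl (fun (s : Int) (c : Char) =>
        s + (PySem.List.pyGet? scores ((c.toNat : Int) - 97)).getD 0) 0 []
    rw [show freqLoopB [] (List.replicate 26 (0 : Int)) = List.replicate 26 0 from rfl, hanyf]
    simp [scLoopA]
  · have hall : ∀ c ∈ word.toList,
        97 ≤ c.toNat ∧ c.toNat ≤ 122 ∧ c.toNat - 97 < count.length := by
      intro c hc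
      have := List.all_eq_true.mp hlowb c hc
      simp only [Bool.and_eq_true, decide_eq_true_eq] at this
      exact ⟨this.1.1, this.1.2, this.2⟩
    refine core_eq word count scores ?_ ?_
    · intro c hc
      exact ⟨by have := (hall c hc).1; omega, (hall c hc).2.1, Or.inl (hall c hc).1⟩
    · intro i hi hocc
      have hocc' : 0 < List.countP (fun c => eff c == i) word.toList := hocc
      rw [List.countP_pos_iff] at hocc'
      obtain ⟨c, hc, hpc⟩ := hocc'
      have heq : eff c = i := by simpa using hpc
      have h3 := hall c hc
      rw [← heq, eff, if_pos h3.1]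
      exact h3.2.2
  · refine core_eq word count scores ?_ ?_
    · intro c hc
      have := List.all_eq_true.mp hmidb c hc
      simp only [Bool.and_eq_true, decide_eq_true_eq] at this
      exact ⟨this.1, this.2, Or.inr ⟨hcount, hscores⟩⟩
    · intro i hi _
      omega
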